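-- pv_equiv track=rewrite | github.com/blast-cu/econ-indicators | data-utils/get_model_data_stats.py | get_agreed_anns
-- ===== SOURCE A (Python) =====
-- from collections import Counter
--
-- def get_agreed_anns(ann_dict: dict):
--     """takes a nested dictionary of annotations (list) and returns
--     nested dictionary of final annotations (str) wrt full agreement """
--
--     for id in ann_dict.keys():
--         curr_ent = ann_dict[id]
--         # TODO: for quant anns, check type before subtypes
--         for type in curr_ent.keys():
--             curr_t = curr_ent[type]
--             result = '\0'
--
--             if len(curr_t) > 0:
--                 anns = [a[1] for a in curr_t]
--                 c = Counter(anns).most_common()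
--                 if len(c) == 1 or c[0][1] != c[1][1]:  # check for tie
--                     result = c[0][0]
--             ann_dict[id][type] = result
--
--     return ann_dict
-- ===== SOURCE B (Python) =====
-- def get_agreed_anns(ann_dict: dict):
--     """takes a nested dictionary of annotations (list) and returns
--     nested dictionary of final annotations (str) wrt full agreement """
--
--     for id in ann_dict.keys():
--         curr_ent = ann_dict[id]
--         for type in curr_ent.keys():
--             counts = {}
--             for a in curr_ent[type]:
--                 label = a[1]
--                 counts[label] = counts.get(label, 0) + 1
--             # single sort-free pass: argmax with tie detection
--             best = '\0'
--             best_count = 0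
--             n_best = 0
--             for label, c in counts.items():
--                 if c > best_count:
--                     best = label
--                     best_count = c
--                     n_best = 1
--                 elif c == best_count:
--                     n_best += 1
--             ann_dict[id][type] = best if n_best == 1 else '\0'
--
--     return ann_dict
-- ===== Notes on version B (the rewrite author's own statement) =====
-- stated objective: faster
-- what changed: Replaces Counter(...).most_common() (building a Counter and sorting its items by count) with a hand-built frequency dict followed by a single sort-free argmax pass that tracks the best label, its count, and how many labels tie for that count; the agreed label is emitted only when exactly one label attains the maximum.
import Mathlib
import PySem

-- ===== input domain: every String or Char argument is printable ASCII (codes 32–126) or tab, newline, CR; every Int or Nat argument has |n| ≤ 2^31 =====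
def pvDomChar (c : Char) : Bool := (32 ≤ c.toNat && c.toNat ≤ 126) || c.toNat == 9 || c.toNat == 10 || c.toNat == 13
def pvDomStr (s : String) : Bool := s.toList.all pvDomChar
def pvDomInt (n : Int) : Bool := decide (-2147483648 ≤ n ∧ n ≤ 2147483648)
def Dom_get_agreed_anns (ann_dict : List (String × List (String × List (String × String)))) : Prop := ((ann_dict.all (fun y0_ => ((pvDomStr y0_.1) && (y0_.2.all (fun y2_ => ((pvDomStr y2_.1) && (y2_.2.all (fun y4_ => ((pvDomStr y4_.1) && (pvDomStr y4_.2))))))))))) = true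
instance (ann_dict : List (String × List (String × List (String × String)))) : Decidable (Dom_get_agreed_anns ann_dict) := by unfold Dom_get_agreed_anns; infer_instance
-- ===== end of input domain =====

-- B replaces Counter(...).most_common() (a sort) by one sort-free argmax-with-tie-count
-- pass over a hand-built frequency dict (objective: alternative). A mutates ann_dict in
-- place and returns it; the equivalence proved here is about the RETURN value only.


-- ===== PORT A =====
def get_agreed_anns (ann_dict : List (String × List (String × List (String × String)))) : List (String × List (String × String)) :=
  ann_dict.map (fun curr_ent =>
    (curr_ent.1, curr_ent.2.map (fun tEnt =>
      (tEnt.1,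
        let curr_t := tEnt.2
        let result := "\x00"
        if curr_t.length > 0 then
          let anns := curr_t.map (fun a => a.2)
          let c := PySem.List.sorted (PySem.Dict.counter anns).items (fun p => p.2) true
          -- 'if len(c) == 1 or c[0][1] != c[1][1]: result = c[0][0]' as a match on c
          match c with
          | [] => result
          | [p] => p.1
          | p :: q :: _ => if p.2 ≠ q.2 then p.1 else result
        else result))))

-- ===== PORT B =====
-- per-cell helper of Source B: count labels into a dict, then one argmax scan with tie count
def pvAgreeCell (curr_t : List (String × String)) : String :=
  let counts := curr_t.foldl (fun d a => d.insert a.2 (d.getD a.2 0 + 1)) PySem.Dict.empty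
  let st := counts.items.foldl (fun s lc =>
      if lc.2 > s.2.1 then (lc.1, lc.2, (1 : Int))
      else if lc.2 = s.2.1 then (s.1, s.2.1, s.2.2 + 1)
      else s) ("\x00", (0 : Int), (0 : Int))
  if st.2.2 = 1 then st.1 else "\x00"

def get_agreed_anns_alt (ann_dict : List (String × List (String × List (String × String)))) : List (String × List (String × String)) :=
  ann_dict.map (fun curr_ent =>
    (curr_ent.1, curr_ent.2.map (fun tEnt => (tEnt.1, pvAgreeCell tEnt.2))))

-- ===== PRECONDITION & SPEC =====
def Spec_get_agreed_anns (ann_dict : List (String × List (String × List (String × String)))) (out : List (String × List (String × String))) : Prop := out = get_agreed_anns_alt ann_dict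
instance (ann_dict : List (String × List (String × List (String × String)))) (out : List (String × List (String × String))) : Decidable (Spec_get_agreed_anns ann_dict out) := by unfold Spec_get_agreed_anns; infer_instance

-- ===== CLAIM (what is proved, stated in full; the proofs are below) =====
def Claim_equal_get_agreed_anns : Prop := ∀ (ann_dict : List (String × List (String × List (String × String)))), Dom_get_agreed_anns ann_dict → Spec_get_agreed_anns ann_dict (get_agreed_anns ann_dict)

-- ===== LEMMAS AND PROOFS =====

-- max of the counts (0 for the empty list)
def pvMaxCnt (l : List (String × Int)) : Int := (l.map Prod.snd).foldl max 0

-- label of the first item attaining the max count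
def pvFirstLbl (l : List (String × Int)) : String :=
  ((l.find? (fun p => decide (p.2 = pvMaxCnt l))).map Prod.fst).getD "\x00"

lemma pvMaxCnt_append (l : List (String × Int)) (x : String × Int) :
    pvMaxCnt (l ++ [x]) = max (pvMaxCnt l) x.2 := by
  simp [pvMaxCnt, List.foldl_append]

lemma pvMaxCnt_le (l : List (String × Int)) (p : String × Int) (hp : p ∈ l) :
    p.2 ≤ pvMaxCnt l := by
  have := (PySem.List.le_foldl_max (l.map Prod.snd) 0).2
  exact this p.2 (List.mem_map.mpr ⟨p, hp, rfl⟩)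

lemma pvMaxCnt_attained (l : List (String × Int)) (hne : l ≠ [])
    (hpos : ∀ p ∈ l, 0 < p.2) : ∃ p ∈ l, p.2 = pvMaxCnt l := by
  rcases PySem.List.foldl_max_mem (l.map Prod.snd) 0 with h0 | hmem
  · exfalso
    rcases List.exists_mem_of_ne_nil l hne with ⟨p, hp⟩
    have h1 := pvMaxCnt_le l p hp
    have h2 := hpos p hp
    have : pvMaxCnt l = 0 := h0
    omega
  · rcases List.mem_map.mp hmem with ⟨p, hp, hpe⟩
    exact ⟨p, hp, hpe⟩

lemma pv_two_countP {α : Type} {l : List α} {pr : α → Bool} {x y : α}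
    (hx : x ∈ l) (hy : y ∈ l) (hxy : x ≠ y) (hpx : pr x = true) (hpy : pr y = true) :
    2 ≤ l.countP pr := by
  have hx' : x ∈ l.filter pr := List.mem_filter.mpr ⟨hx, hpx⟩
  have hy' : y ∈ l.filter pr := List.mem_filter.mpr ⟨hy, hpy⟩
  rw [List.countP_eq_length_filter]
  rcases hf : l.filter pr with _ | ⟨a, _ | ⟨b, t⟩⟩
  · simp [hf] at hx'
  · rw [hf] at hx' hy'
    simp at hx' hy'
    exact absurd (hx'.trans hy'.symm) hxy
  · simp

-- the argmax scan of B computes (first max label, max, multiplicity of the max)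
lemma pvScanB (l : List (String × Int)) (hpos : ∀ p ∈ l, 0 < p.2) :
    l.foldl (fun s lc =>
      if lc.2 > s.2.1 then (lc.1, lc.2, (1 : Int))
      else if lc.2 = s.2.1 then (s.1, s.2.1, s.2.2 + 1)
      else s) ("\x00", (0 : Int), (0 : Int))
    = (pvFirstLbl l, pvMaxCnt l, (l.countP (fun p => decide (p.2 = pvMaxCnt l)) : Int)) := by
  induction l using List.reverseRecOn with
  | nil => simp [pvFirstLbl, pvMaxCnt]
  | append_singleton l x ih =>
    have hposl : ∀ p ∈ l, 0 < p.2 := fun p hp => hpos p (by simp [hp])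
    have hxpos : 0 < x.2 := hpos x (by simp)
    rw [List.foldl_append, ih hposl]
    simp only [List.foldl_cons, List.foldl_nil, gt_iff_lt]
    split_ifs with h1 h2
    · -- x is a strictly new max
      have hM : pvMaxCnt (l ++ [x]) = x.2 := by rw [pvMaxCnt_append]; omega
      have hnone : l.find? (fun p => decide (p.2 = x.2)) = none := by
        apply List.find?_eq_none.mpr
        intro p hp
        have := pvMaxCnt_le l p hp
        simp; omega
      have hcnt : l.countP (fun p => decide (p.2 = x.2)) = 0 := by
        apply List.countP_eq_zero.mpr
        intro p hp
        have := pvMaxCnt_le l p hp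
        simp; omega
      rw [Prod.mk.injEq, Prod.mk.injEq]
      refine ⟨?_, by omega, ?_⟩
      · simp [pvFirstLbl, List.find?_append, hM, hnone]
      · rw [List.countP_append, hM, hcnt]
        simp
    · -- x ties the current max; l must be nonempty
      have hlne : l ≠ [] := by
        intro h; subst h; simp [pvMaxCnt] at h2; omega
      have hM : pvMaxCnt (l ++ [x]) = pvMaxCnt l := by rw [pvMaxCnt_append]; omega
      rcases pvMaxCnt_attained l hlne hposl with ⟨r, hr, hre⟩
      have hsome : (l.find? (fun p => decide (p.2 = pvMaxCnt l))).isSome := by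
        rw [List.find?_isSome]
        exact ⟨r, hr, by simp [hre]⟩
      rcases Option.isSome_iff_exists.mp hsome with ⟨r0, hr0⟩
      rw [Prod.mk.injEq, Prod.mk.injEq]
      refine ⟨?_, by omega, ?_⟩
      · simp [pvFirstLbl, List.find?_append, hM, hr0]
      · rw [List.countP_append, hM]
        simp [h2]
    · -- x below the max: state unchanged
      have hlt : x.2 < pvMaxCnt l := by omega
      have hM : pvMaxCnt (l ++ [x]) = pvMaxCnt l := by rw [pvMaxCnt_append]; omega
      rw [Prod.mk.injEq, Prod.mk.injEq]
      refine ⟨?_, by omega, ?_⟩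
      · simp [pvFirstLbl, List.find?_append, hM, h2]
      · rw [List.countP_append, hM]
        simp [h2]

-- A's sorted-head-with-tie-check equals the unique-max reference
lemma pvCellA (items : List (String × Int)) (hpos : ∀ p ∈ items, 0 < p.2) :
    (match PySem.List.sorted items (fun p => p.2) true with
     | [] => "\x00"
     | [p] => p.1
     | p :: q :: _ => if p.2 ≠ q.2 then p.1 else "\x00")
    = (if items.countP (fun p => decide (p.2 = pvMaxCnt items)) = 1 then pvFirstLbl items else "\x00") := by
  rcases hs : PySem.List.sorted items (fun p => p.2) true with _ | ⟨p, _ | ⟨q, t⟩⟩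
  · have : items = [] := (PySem.List.sorted_eq_nil_iff items _ true).mp hs
    subst this
    simp
  · -- singleton
    have hperm : ([p] : List (String × Int)).Perm items := hs ▸ PySem.List.sorted_perm items _ true
    have hitems : items = [p] := (List.Perm.eq_singleton hperm.symm)
    subst hitems
    have hp2 : 0 < p.2 := hpos p (by simp)
    have hM : pvMaxCnt [p] = p.2 := by simp [pvMaxCnt]; omega
    simp [hM, pvFirstLbl]
  · have hperm : (p :: q :: t).Perm items := hs ▸ PySem.List.sorted_perm items _ true
    have hpmem : p ∈ items := hperm.mem_iff.mp (by simp)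
    have hqmem : q ∈ items := hperm.mem_iff.mp (by simp)
    have hple : ∀ y ∈ items, y.2 ≤ p.2 := PySem.List.key_head_sorted_rev_ge items (fun p => p.2) hs
    have hM : pvMaxCnt items = p.2 := by
      have h1 : p.2 ≤ pvMaxCnt items := pvMaxCnt_le items p hpmem
      rcases PySem.List.foldl_max_mem (items.map Prod.snd) 0 with h0 | hmem
      · have h3 : pvMaxCnt items = 0 := h0
        have := hpos p hpmem
        omega
      · rcases List.mem_map.mp hmem with ⟨r, hr, hre⟩
        have h4 := hple r hr
        have h5 : pvMaxCnt items = r.2 := hre.symm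
        omega
    have hcntP : items.countP (fun p' => decide (p'.2 = pvMaxCnt items))
        = (p :: q :: t).countP (fun p' => decide (p'.2 = pvMaxCnt items)) :=
      (hperm.countP_eq _).symm
    by_cases hpq : p.2 = q.2
    · -- tie at the top: both sides give '\0'
      have h2 : 2 ≤ items.countP (fun p' => decide (p'.2 = pvMaxCnt items)) := by
        rw [hcntP]
        simp [hM, hpq.symm]
      simp only [hpq, ne_eq, not_true_eq_false, if_false]
      rw [if_neg (by omega)]
    · -- unique max: A's head is the unique max item, B's find? returns it too
      have hqlt : q.2 < p.2 := lt_of_le_of_ne (hple q hqmem) (fun h => hpq h.symm)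
      have hpw := PySem.List.sorted_pairwise_rev items (fun p => p.2)
      rw [hs] at hpw
      have htle : ∀ y ∈ t, y.2 ≤ q.2 := (List.pairwise_cons.mp (List.pairwise_cons.mp hpw).2).1
      have hq' : ¬ (q.2 = p.2) := fun h => hpq h.symm
      have ht0 : t.countP (fun p' => decide (p'.2 = pvMaxCnt items)) = 0 := by
        apply List.countP_eq_zero.mpr
        intro y hy
        have := htle y hy
        simp [hM]; omega
      have hcnt1 : items.countP (fun p' => decide (p'.2 = pvMaxCnt items)) = 1 := by
        rw [hcntP]
        simp only [hM] at ht0 ⊢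
        simp [hq', ht0]
      rw [if_pos hcnt1]
      -- pvFirstLbl items = p.1
      rcases pvMaxCnt_attained items (by rintro rfl; simp at hpmem) hpos with ⟨r, hrm, hre⟩
      have hsome : (items.find? (fun p' => decide (p'.2 = pvMaxCnt items))).isSome := by
        rw [List.find?_isSome]
        exact ⟨r, hrm, by simp [hre]⟩
      rcases Option.isSome_iff_exists.mp hsome with ⟨r0, hr0⟩
      have hr0mem : r0 ∈ items := List.mem_of_find?_eq_some hr0
      have hr0p : r0.2 = pvMaxCnt items := by
        have := List.find?_some hr0
        simpa using this
      have hr0eq : r0 = p := by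
        by_contra hne
        have h2 := pv_two_countP (pr := fun p' => decide (p'.2 = pvMaxCnt items))
          hr0mem hpmem hne (by simp [hr0p]) (by simp [hM])
        omega
      simp only [ne_eq, hpq, not_false_iff, if_true]
      simp [pvFirstLbl, hr0, hr0eq]

-- per-cell equality: A's cell computation equals pvAgreeCell
lemma pvCell_eq (curr_t : List (String × String)) :
    (let result := "\x00"
     if curr_t.length > 0 then
       let anns := curr_t.map (fun a => a.2)
       let c := PySem.List.sorted (PySem.Dict.counter anns).items (fun p => p.2) true
       match c with
       | [] => result
       | [p] => p.1
       | p :: q :: _ => if p.2 ≠ q.2 then p.1 else result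
     else result)
    = pvAgreeCell curr_t := by
  rcases curr_t with _ | ⟨a0, rest⟩
  · rfl
  · have hcounts : (a0 :: rest).foldl (fun d a => d.insert a.2 (d.getD a.2 0 + 1)) PySem.Dict.empty
        = PySem.Dict.counter ((a0 :: rest).map (fun a => a.2)) := by
      rw [← PySem.Dict.foldl_insert_getD_add_one_eq_counter, List.foldl_map]
    have hpos : ∀ p ∈ (PySem.Dict.counter ((a0 :: rest).map (fun a => a.2))).items, 0 < p.2 := by
      intro p hp
      rw [PySem.Dict.items_counter] at hp
      rcases List.mem_map.mp hp with ⟨k, hk, hke⟩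
      have hk' : k ∈ (a0 :: rest).map (fun a => a.2) :=
        (PySem.Set.mem_ofList _ k).mp hk
      have h1 : 1 ≤ ((a0 :: rest).map (fun a => a.2)).count k := List.one_le_count_iff.mpr hk'
      subst hke
      show (0 : Int) < (((a0 :: rest).map (fun a => a.2)).count k : Int)
      exact_mod_cast h1
    show (if (a0 :: rest).length > 0 then _ else _) = _
    rw [if_pos (by simp)]
    rw [pvCellA _ hpos]
    simp only [pvAgreeCell]
    rw [hcounts, pvScanB _ hpos]
    -- the Int-valued tie count equals 1 iff the Nat countP does
    simp

-- ===== VERDICT (by name: the statement is the Claim_ definition above) =====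
theorem get_agreed_anns_spec : Claim_equal_get_agreed_anns := by
  intro ann_dict _
  unfold Spec_get_agreed_anns get_agreed_anns get_agreed_anns_alt
  apply List.map_congr_left
  intro ent _
  refine congrArg _ ?_
  apply List.map_congr_left
  intro tEnt _
  refine congrArg _ (pvCell_eq tEnt.2)
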